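/- GENERATED by mk_final_copies.py from the proof of the farm's unit `decode_residue.1c` (farm:decode_residue.1c.2: Proof.lean) as the
   re-elaboration sweep compiled it — do not edit. -/
import Vorbis.Spec.Units.decode_residue_1c
import Vorbis.Spec.Worked.decode_residue_1c_Lemmas

open X86 X86.User Asan Vorbis Vorbis.Spec Vorbis.Spec.DecodeResidue

/-- Unit `decode_residue.1c`: from `ret8` (0x10ed48, `At1c`: before the `div`) to `cut1` (0x10edca, `At1d`: after the temp
allocation). The walk is `alloc_walk` of Lemmas.lean, with the callee's contract for the live lists inside the function
(`g.others`, `g.frames'`) and the arena ghost of the entry (`g.A`). -/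
theorem Vorbis.Spec.Worked.decode_residue_1c_ok : Vorbis.Spec.decode_residue_1c.Statement := by
  intro Lay hLay μ hμ u₀ hcode hld8 hld4 h_stm
  intro g hent v hat
  exact Vorbis.Spec.decode_residue_1c.alloc_walk hLay hμ hcode hld8 hld4 g (h_stm g.others g.frames' g.A) hent v hat
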